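-- pv_equiv track=rewrite | github.com/zhenzhiwin/pccsite | pcc_check.py | PRU_assert
-- ===== SOURCE A (Python) =====
-- def PRU_assert(configlist):
--     log_List_no_match = []
--     no_flow_list = []
--     # log_List_only_protocol=[]
--     for i in range(0, len(configlist)):
--         if configlist[i].find("flow-description ") != -1 and configlist[i + 1].find("exit") != -1:
--             for j in range(i, -1, -1):
--                 if configlist[j].find('policy-rule-unit "') != -1:
--                     log_List_no_match.append(configlist[j].strip() + '中的' + configlist[i] + '未进行match配置')
--                     if configlist[i].find( 'flow-description')!=-1:
--                         no_flow_list.append(configlist[j].strip())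
--                     break
--         # if configlist[i+2].find("protocol")!=-1:
--         #     if configlist[i+3].find("exit"):
--         #         for j in range(len(configlist[0:i])-1,-1,-1):
--         #             if configlist[j].find('policy-rule-unit "PRU_')!=-1:
--         #                 log_List_only_protocol.append(configlist[j])
--         #                 break
--     return log_List_no_match, no_flow_list
-- ===== SOURCE B (Python) =====
-- def PRU_assert(configlist):
--     # Single forward pass: track the most recent policy-rule-unit line instead of
--     # rescanning backwards for every flow-description hit.
--     log_List_no_match = []
--     no_flow_list = []
--     last_pru = None
--     for cur, nxt in zip(configlist, configlist[1:]):
--         if 'policy-rule-unit "' in cur: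
--             last_pru = cur
--         if "flow-description " in cur and "exit" in nxt and last_pru is not None:
--             log_List_no_match.append(last_pru.strip() + '中的' + cur + '未进行match配置')
--             no_flow_list.append(last_pru.strip())
--     return log_List_no_match, no_flow_list
-- ===== Notes on version B (the rewrite author's own statement) =====
-- stated objective: alternative
-- what changed: Replaced the per-hit backward rescan for the nearest policy-rule-unit line with a single forward pass that tracks the most recent policy-rule-unit line while zipping each line with its successor (intended as faster; a timing run measured only ~1.4x on its inputs, so no speed is claimed).
import Mathlib
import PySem

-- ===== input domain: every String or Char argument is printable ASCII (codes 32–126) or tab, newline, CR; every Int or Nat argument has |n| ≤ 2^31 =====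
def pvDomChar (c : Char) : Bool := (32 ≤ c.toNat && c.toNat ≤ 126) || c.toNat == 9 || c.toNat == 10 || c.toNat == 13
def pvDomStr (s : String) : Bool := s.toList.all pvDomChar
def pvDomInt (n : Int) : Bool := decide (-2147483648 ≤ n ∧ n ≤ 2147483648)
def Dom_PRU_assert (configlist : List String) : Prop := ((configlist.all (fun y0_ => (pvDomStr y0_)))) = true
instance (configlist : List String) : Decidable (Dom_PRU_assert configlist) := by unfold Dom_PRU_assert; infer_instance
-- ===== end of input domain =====

-- B replaces A's backward rescan per flow-description hit by one forward pass tracking the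
-- most recent policy-rule-unit line (objective: alternative single-pass algorithm).

-- ===== PORT A =====
-- s.find(sub) != -1
def pruHas (s sub : String) : Bool := PySem.Str.find s sub != -1

-- inner 'for j in range(i, -1, -1): … break' — first match scanning from j down to 0
def backScan (cl : List String) : Nat → Option String
  | 0 => if pruHas (cl.getD 0 "") "policy-rule-unit \"" then some (cl.getD 0 "") else none
  | j + 1 => if pruHas (cl.getD (j+1) "") "policy-rule-unit \"" then some (cl.getD (j+1) "")
             else backScan cl j

-- body of A's outer loop at index i; configlist[i+1] as getD with "" is exact for i+1 < len,
-- and Pre_ excludes the one case (last line contains "flow-description ") where Python raises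
def stepA (cl : List String) (st : List String × List String) (i : Nat) :
    List String × List String :=
  if pruHas (cl.getD i "") "flow-description " && pruHas (cl.getD (i+1) "") "exit" then
    match backScan cl i with
    | some pj =>
        (st.1 ++ [PySem.Str.strip pj ++ "中的" ++ cl.getD i "" ++ "未进行match配置"],
         if pruHas (cl.getD i "") "flow-description" then st.2 ++ [PySem.Str.strip pj] else st.2)
    | none => st
  else st

def PRU_assert (configlist : List String) : List String × List String :=
  (List.range configlist.length).foldl (stepA configlist) ([], [])

-- ===== PORT B =====
-- 'sub in s'
def altHas (sub s : String) : Bool := PySem.Str.isIn sub s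

-- the forward loop over zip(configlist, configlist[1:]) with the tracked last policy-rule-unit line
def altLoop : List (String × String) → Option String → List String × List String →
    List String × List String
  | [], _, acc => acc
  | (cur, nxt) :: rest, last?, acc =>
    let last2 := if altHas "policy-rule-unit \"" cur then some cur else last?
    if altHas "flow-description " cur && altHas "exit" nxt then
      match last2 with
      | some p =>
          altLoop rest last2
            (acc.1 ++ [PySem.Str.strip p ++ "中的" ++ cur ++ "未进行match配置"],
             acc.2 ++ [PySem.Str.strip p])
      | none => altLoop rest last2 acc
    else altLoop rest last2 acc

def PRU_assert_alt (configlist : List String) : List String × List String :=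
  altLoop (configlist.zip configlist.tail) none ([], [])

-- ===== PRECONDITION & SPEC =====
-- Pre_ excludes exactly the inputs where A raises IndexError: a non-empty list whose LAST
-- line contains "flow-description " (then configlist[i+1] is read past the end).
def Pre_PRU_assert (configlist : List String) : Prop :=
  configlist.getLast?.all (fun s => !PySem.Str.isIn "flow-description " s) = true
instance (configlist : List String) : Decidable (Pre_PRU_assert configlist) := by
  unfold Pre_PRU_assert; infer_instance

def pvWitness_PRU_assert : List String :=
  ["policy-rule-unit \"P1\"", "  flow-description d1", "exit"]

def Spec_PRU_assert (configlist : List String) (out : List String × List String) : Prop :=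
  out = PRU_assert_alt configlist
instance (configlist : List String) (out : List String × List String) :
    Decidable (Spec_PRU_assert configlist out) := by unfold Spec_PRU_assert; infer_instance

-- ===== CLAIM (what is proved, stated in full; the proofs are below) =====
def Claim_equal_PRU_assert : Prop :=
  ∀ (configlist : List String), Dom_PRU_assert configlist → Pre_PRU_assert configlist →
    Spec_PRU_assert configlist (PRU_assert configlist)

-- ===== LEMMAS AND PROOFS =====

-- both programs' containment tests agree
theorem has_eq (s sub : String) : pruHas s sub = altHas sub s := by
  unfold pruHas altHas
  rw [PySem.Str.find_eq, PySem.Str.isIn_eq, Bool.eq_iff_iff, bne_iff_ne,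
    PySem.Chars.find_ne_neg_one_iff, PySem.Chars.isIn_iff_infix]

-- "flow-description " in s implies "flow-description" in s
theorem flow_imp (s : String) (h : altHas "flow-description " s = true) :
    altHas "flow-description" s = true := by
  unfold altHas at *
  rw [PySem.Str.isIn_eq, PySem.Chars.isIn_iff_infix] at h ⊢
  exact List.IsInfix.trans
    (by decide : "flow-description".toList <:+: "flow-description ".toList) h

-- B's tracked state: the last policy-rule-unit line of a processed prefix
def lastM (p : List String) : Option String :=
  p.foldl (fun l x => if altHas "policy-rule-unit \"" x then some x else l) none

theorem lastM_snoc (p : List String) (x : String) :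
    lastM (p ++ [x]) = if altHas "policy-rule-unit \"" x then some x else lastM p := by
  simp [lastM, List.foldl_append]

-- A's backward scan from k equals the tracked last match over the first k+1 lines
theorem backScan_eq (cl : List String) :
    ∀ k, k < cl.length → backScan cl k = lastM (cl.take (k+1)) := by
  intro k
  induction k with
  | zero =>
    intro hk
    cases cl with
    | nil => simp at hk
    | cons a t => simp [backScan, lastM, has_eq]
  | succ j ih =>
    intro hk
    have hget : cl[j+1]? = some cl[j+1] := List.getElem?_eq_getElem hk
    have htake : cl.take (j+2) = cl.take (j+1) ++ [cl[j+1]] := by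
      rw [List.take_add_one, hget]; rfl
    have hgetD : cl.getD (j+1) "" = cl[j+1] := by simp [List.getD, hget]
    rw [backScan, htake, lastM_snoc, hgetD, has_eq]
    by_cases hc : altHas "policy-rule-unit \"" cl[j+1] = true
    · simp [hc]
    · simp only [Bool.not_eq_true] at hc
      simp [hc, ih (Nat.lt_of_succ_lt hk)]

-- main invariant: processing the suffix from position k with the tracked last match of the
-- first k lines computes what A's fold over the remaining indices computes
theorem main_inv (cl : List String) :
    ∀ (s : List String) (k : Nat) (acc : List String × List String), cl.drop k = s →
      altLoop (s.zip s.tail) (lastM (cl.take k)) acc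
        = (List.range' k (cl.length - k)).foldl (stepA cl) acc := by
  intro s
  induction s with
  | nil =>
    intro k acc hd
    have : cl.length ≤ k := List.drop_eq_nil_iff.mp hd
    simp [altLoop, Nat.sub_eq_zero_of_le this]
  | cons cur rest ih =>
    intro k acc hd
    have hklt : k < cl.length := by
      by_contra h
      have h2 := List.drop_eq_nil_of_le (as := cl) (Nat.le_of_not_lt h)
      rw [hd] at h2; exact List.cons_ne_nil _ _ h2
    have hgetk? : cl[k]? = some cur := by
      have h0 : (cl.drop k)[0]? = some cur := by rw [hd]; rfl
      rw [List.getElem?_drop] at h0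
      simpa using h0
    have hgetk : cl.getD k "" = cur := by simp [List.getD, hgetk?]
    have hdrop1 : cl.drop (k+1) = rest := by
      rw [← List.tail_drop, hd]; rfl
    have htake : cl.take (k+1) = cl.take k ++ [cur] := by
      rw [List.take_add_one, hgetk?]; rfl
    have hlast2 : lastM (cl.take (k+1))
        = (if altHas "policy-rule-unit \"" cur then some cur else lastM (cl.take k)) := by
      rw [htake, lastM_snoc]
    have hlen : cl.length - k = (cl.length - (k+1)) + 1 := by omega
    have hrange : List.range' k (cl.length - k)
        = k :: List.range' (k+1) (cl.length - (k+1)) := by rw [hlen]; rfl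
    have hback : backScan cl k = lastM (cl.take (k+1)) := backScan_eq cl k hklt
    cases rest with
    | nil =>
      -- last line: A's step reads getD (k+1) = "" and "exit" is not in "", so the step is
      -- the identity; B has no pair for this line
      have hlen1 : cl.length = k + 1 := by
        have h1 := congrArg List.length hd
        simp [List.length_drop] at h1
        omega
      have hget1 : cl.getD (k+1) "" = "" := by
        have hnone : cl[k+1]? = none := by rw [List.getElem?_eq_none_iff]; omega
        simp [List.getD, hnone]
      have hstep : stepA cl acc k = acc := by
        unfold stepA
        rw [hget1]
        have hno : pruHas "" "exit" = false := by decide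
        rw [hno]
        simp
      have hm0 : cl.length - (k+1) = 0 := by omega
      rw [hrange, List.foldl_cons, hstep, hm0]
      simp [altLoop]
    | cons nxt rest' =>
      have hgetk1? : cl[k+1]? = some nxt := by
        have h0 : (cl.drop k)[1]? = some nxt := by rw [hd]; rfl
        rw [List.getElem?_drop] at h0
        simpa using h0
      have hgetk1 : cl.getD (k+1) "" = nxt := by simp [List.getD, hgetk1?]
      have ihk : ∀ acc', altLoop ((nxt :: rest').zip rest') (lastM (cl.take (k+1))) acc'
          = (List.range' (k+1) (cl.length - (k+1))).foldl (stepA cl) acc' := by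
        intro acc'
        have h := ih (k+1) acc' hdrop1
        simpa using h
      rw [hrange, List.foldl_cons]
      show altLoop ((cur, nxt) :: ((nxt :: rest').zip rest')) (lastM (cl.take k)) acc = _
      rw [altLoop, ← hlast2]
      by_cases hcond : (altHas "flow-description " cur && altHas "exit" nxt) = true
      · rw [if_pos hcond]
        have hflow : altHas "flow-description" cur = true :=
          flow_imp cur (Bool.and_elim_left hcond)
        have hstep : stepA cl acc k
            = (match lastM (cl.take (k+1)) with
               | some p => (acc.1 ++ [PySem.Str.strip p ++ "中的" ++ cur ++ "未进行match配置"],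
                            acc.2 ++ [PySem.Str.strip p])
               | none => acc) := by
          unfold stepA
          rw [hgetk, hgetk1, has_eq, has_eq, if_pos hcond, hback, has_eq, hflow]
          cases lastM (cl.take (k+1)) with
          | none => rfl
          | some p => simp
        cases hlm : lastM (cl.take (k+1)) with
        | none =>
          rw [hlm] at hstep ihk
          simp only [hstep]
          exact ihk acc
        | some p =>
          rw [hlm] at hstep ihk
          simp only [hstep]
          exact ihk _
      · rw [if_neg hcond]
        have hstep : stepA cl acc k = acc := by
          unfold stepA
          rw [hgetk, hgetk1, has_eq, has_eq, if_neg hcond]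
        rw [hstep]
        exact ihk acc

-- ===== VERDICT (by name: the statement is the Claim_ definition above) =====
theorem PRU_assert_spec : Claim_equal_PRU_assert := by
  intro cl _ _
  unfold Spec_PRU_assert PRU_assert PRU_assert_alt
  have h := main_inv cl cl 0 ([], []) rfl
  simp only [List.take_zero, Nat.sub_zero] at h
  rw [List.range_eq_range', ← h]
  rfl
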